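-- pv_equiv track=rewrite | github.com/git03-Nguyen/Gem-Hunter-Solvers | utils.py | edit_matrix
-- ===== SOURCE A (Python) =====
-- def edit_matrix(matrix, model):
--     '''Chỉnh sửa ma trận kết quả từ model của SAT Solver:\\
--           Ô nào False thì là "G", True thì là "T".
--     '''
--     n_rows = len(matrix)
--     n_cols = len(matrix[0])
--     for i in range(n_rows):
--         for j in range(n_cols):
--             if matrix[i][j] is None:
--                 index = i * n_cols + j + 1
--                 matrix[i][j] = "T" if index in model else "G"
--
--     return matrix
-- ===== SOURCE B (Python) =====
-- def edit_matrix(matrix, model):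
--     # Model-driven: place "T" from positive literals, then fill remaining None with "G".
--     # Mutates `matrix` in place and returns it (same as the original).
--     n_rows = len(matrix)
--     n_cols = len(matrix[0])
--     if n_cols:
--         for v in model:
--             if v > 0:
--                 i, j = divmod(v - 1, n_cols)
--                 if i < n_rows and matrix[i][j] is None:
--                     matrix[i][j] = "T"
--     for row in matrix:
--         for j in range(n_cols):
--             if row[j] is None:
--                 row[j] = "G"
--     return matrix
-- ===== Notes on version B (the rewrite author's own statement) =====
-- stated objective: faster
-- what changed: Instead of testing every cell's linear index for membership in `model` (a list scan per cell), B makes one pass over `model` placing "T" at divmod(v-1, n_cols) for each in-range positive literal, then a second pass filling every remaining None cell with "G".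
import Mathlib
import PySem

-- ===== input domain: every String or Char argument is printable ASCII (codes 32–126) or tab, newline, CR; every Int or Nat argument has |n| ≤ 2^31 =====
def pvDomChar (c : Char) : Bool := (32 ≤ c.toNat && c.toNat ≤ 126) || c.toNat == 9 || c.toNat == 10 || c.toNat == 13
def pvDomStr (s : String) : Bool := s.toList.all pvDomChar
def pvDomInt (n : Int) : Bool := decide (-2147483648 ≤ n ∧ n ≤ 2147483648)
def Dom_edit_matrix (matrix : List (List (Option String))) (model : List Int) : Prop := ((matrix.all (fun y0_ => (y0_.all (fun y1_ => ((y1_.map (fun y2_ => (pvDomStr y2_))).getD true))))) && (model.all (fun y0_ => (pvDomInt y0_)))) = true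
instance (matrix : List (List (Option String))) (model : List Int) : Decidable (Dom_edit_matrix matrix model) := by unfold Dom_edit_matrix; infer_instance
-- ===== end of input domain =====

-- B replaces A's per-cell `index in model` scan with one placement pass over the model
-- plus a default-fill pass (asymptotically fewer operations); equivalence is about the
-- RETURN value only — both Pythons also mutate `matrix` in place in the same way.

-- ===== PORT A =====
-- Literal port of A: for each cell with j < n_cols, a None cell becomes "T" iff its
-- 1-based linear index occurs in `model`, else "G"; other cells are untouched.
-- (matrix[0] raises on an empty matrix: excluded by Pre_ below.)
def edit_matrix (matrix : List (List (Option String))) (model : List Int) : List (List (Option String)) :=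
  let n_cols := (matrix.headD []).length
  matrix.mapIdx (fun i row =>
    row.mapIdx (fun j c =>
      if j < n_cols then
        match c with
        | none => if (((i * n_cols + j + 1 : Nat) : Int) ∈ model) then some "T" else some "G"
        | some s => some s
      else c))

-- ===== PORT B =====
-- one model literal: if positive, place "T" at divmod(v-1, n_cols) when the row index is
-- in range and the cell is None.  v > 0 so v-1 ≥ 0 and Python's divmod is Nat div/mod here.
def pvStep (n_rows n_cols : Nat) (m : List (List (Option String))) (v : Int) : List (List (Option String)) :=
  if 0 < v then
    if (v - 1).toNat / n_cols < n_rows then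
      m.modify ((v - 1).toNat / n_cols)
        (fun row => row.modify ((v - 1).toNat % n_cols) (fun c => if c = none then some "T" else c))
    else m
  else m

def edit_matrix_alt (matrix : List (List (Option String))) (model : List Int) : List (List (Option String)) :=
  let n_rows := matrix.length
  let n_cols := (matrix.headD []).length
  let m1 := if n_cols ≠ 0 then model.foldl (pvStep n_rows n_cols) matrix else matrix
  m1.map (fun row => row.mapIdx (fun j c => if j < n_cols ∧ c = none then some "G" else c))

-- ===== PRECONDITION & SPEC =====
-- Pre_ is exactly the set of inputs where Python A returns: A raises IndexError on an
-- empty matrix (matrix[0]) and whenever some row is shorter than the first row.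
def Pre_edit_matrix (matrix : List (List (Option String))) (model : List Int) : Prop :=
  matrix ≠ [] ∧ ∀ row ∈ matrix, (matrix.headD []).length ≤ row.length
instance (matrix : List (List (Option String))) (model : List Int) : Decidable (Pre_edit_matrix matrix model) := by unfold Pre_edit_matrix; infer_instance

def pvWitness_edit_matrix : List (List (Option String)) × List Int :=
  ([[none, some "x"], [none, none]], [1, -2, 4])

def Spec_edit_matrix (matrix : List (List (Option String))) (model : List Int) (out : List (List (Option String))) : Prop := out = edit_matrix_alt matrix model
instance (matrix : List (List (Option String))) (model : List Int) (out : List (List (Option String))) : Decidable (Spec_edit_matrix matrix model out) := by unfold Spec_edit_matrix; infer_instance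

-- ===== CLAIM (what is proved, stated in full; the proofs are below) =====
def Claim_equal_edit_matrix : Prop := ∀ (matrix : List (List (Option String))) (model : List Int), Dom_edit_matrix matrix model → Pre_edit_matrix matrix model → Spec_edit_matrix matrix model (edit_matrix matrix model)

-- ===== LEMMAS AND PROOFS =====

-- the cell at position (i, j), `none` when out of range
def pvCell (m : List (List (Option String))) (i j : Nat) : Option (Option String) :=
  m[i]? >>= fun r => r[j]?

-- the "mark a None cell as T" function; idempotent
def pvMark (c : Option String) : Option String := if c = none then some "T" else c

lemma pvMark_idem (c : Option String) : pvMark (pvMark c) = pvMark c := by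
  unfold pvMark; split_ifs with h1 h2 <;> simp_all

lemma pvStep_length (nr nc : Nat) (m : List (List (Option String))) (v : Int) :
    (pvStep nr nc m v).length = m.length := by
  unfold pvStep; split_ifs <;> simp

lemma pvStep_row_length (nr nc : Nat) (m : List (List (Option String))) (v : Int) (i : Nat) :
    ((pvStep nr nc m v)[i]?.map List.length) = (m[i]?.map List.length) := by
  unfold pvStep
  split_ifs with h1 h2
  · rw [List.getElem?_modify]
    rcases m[i]? with _ | row <;> simp
    split_ifs <;> simp
  · rfl
  · rfl

lemma coord_iff (nc : Nat) (hnc : nc ≠ 0) (v : Int) (i j : Nat) (hv : 0 < v) :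
    ((v - 1).toNat / nc = i ∧ (v - 1).toNat % nc = j) ↔
      (v = ((i * nc + j + 1 : Nat) : Int) ∧ j < nc) := by
  constructor
  · rintro ⟨hi, hj⟩
    have hlt : (v - 1).toNat % nc < nc := Nat.mod_lt _ (Nat.pos_of_ne_zero hnc)
    have hdm := Nat.div_add_mod (v - 1).toNat nc
    rw [hi, hj] at hdm
    rw [hj] at hlt
    have hcm : nc * i = i * nc := Nat.mul_comm nc i
    exact ⟨by omega, hlt⟩
  · rintro ⟨hv', hj⟩
    have h1 : (v - 1).toNat = i * nc + j := by omega
    rw [h1]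
    have h2 : i * nc + j = j + nc * i := by ring
    rw [h2]
    constructor
    · rw [Nat.add_mul_div_left _ _ (Nat.pos_of_ne_zero hnc), Nat.div_eq_of_lt hj]; omega
    · rw [Nat.add_mul_mod_self_left, Nat.mod_eq_of_lt hj]

lemma pvStep_cell (nr nc : Nat) (hnc : nc ≠ 0) (m : List (List (Option String))) (v : Int)
    (i j : Nat) :
    pvCell (pvStep nr nc m v) i j =
      if v = ((i * nc + j + 1 : Nat) : Int) ∧ i < nr ∧ j < nc then
        (pvCell m i j).map pvMark
      else pvCell m i j := by
  unfold pvStep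
  by_cases hv : 0 < v
  · simp only [hv, if_true]
    by_cases hr : (v - 1).toNat / nc < nr
    · simp only [hr, if_true]
      unfold pvCell
      rw [List.getElem?_modify]
      rcases h : m[i]? with _ | row
      · simp
      · by_cases hi : (v - 1).toNat / nc = i
        · simp only [hi, if_true, Option.map_eq_map, Option.map_some, Option.bind_eq_bind, Option.bind_some]
          rw [List.getElem?_modify]
          by_cases hj : (v - 1).toNat % nc = j
          · have hco := (coord_iff nc hnc v i j hv).mp ⟨hi, hj⟩
            simp only [hj]
            have : (v = ((i * nc + j + 1 : Nat) : Int) ∧ i < nr ∧ j < nc) := ⟨hco.1, hi ▸ hr, hco.2⟩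
            rw [if_pos this]
            rcases row[j]? with _ | c <;> simp [pvMark]
          · simp only [hj]
            have : ¬ (v = ((i * nc + j + 1 : Nat) : Int) ∧ i < nr ∧ j < nc) := by
              rintro ⟨h1, h2, h3⟩
              exact hj ((coord_iff nc hnc v i j hv).mpr ⟨h1, h3⟩).2
            rw [if_neg this]
            simp
        · simp only [hi]
          have : ¬ (v = ((i * nc + j + 1 : Nat) : Int) ∧ i < nr ∧ j < nc) := by
            rintro ⟨h1, h2, h3⟩
            exact hi ((coord_iff nc hnc v i j hv).mpr ⟨h1, h3⟩).1
          rw [if_neg this]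
          simp
    · simp only [hr, if_false]
      have : ¬ (v = ((i * nc + j + 1 : Nat) : Int) ∧ i < nr ∧ j < nc) := by
        rintro ⟨h1, h2, h3⟩
        exact hr (((coord_iff nc hnc v i j hv).mpr ⟨h1, h3⟩).1 ▸ h2)
      rw [if_neg this]
  · simp only [hv, if_false]
    have : ¬ (v = ((i * nc + j + 1 : Nat) : Int) ∧ i < nr ∧ j < nc) := by
      rintro ⟨h1, _, _⟩; omega
    rw [if_neg this]

lemma pvFold_cell (nr nc : Nat) (hnc : nc ≠ 0) (model : List Int)
    (m : List (List (Option String))) (i j : Nat) :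
    pvCell (model.foldl (pvStep nr nc) m) i j =
      if ((i * nc + j + 1 : Nat) : Int) ∈ model ∧ i < nr ∧ j < nc then
        (pvCell m i j).map pvMark
      else pvCell m i j := by
  induction model generalizing m with
  | nil => simp
  | cons v rest ih =>
    simp only [List.foldl_cons]
    rw [ih, pvStep_cell nr nc hnc]
    by_cases hmem : ((i * nc + j + 1 : Nat) : Int) ∈ rest
    · by_cases hr : i < nr ∧ j < nc
      · simp only [List.mem_cons, hmem, or_true, hr, and_true, if_true]
        split_ifs with h
        · rw [Option.map_map]
          congr 1
          funext c
          exact pvMark_idem c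
        · rfl
      · simp [hr]
    · by_cases hv : v = ((i * nc + j + 1 : Nat) : Int)
      · have hm1 : ¬ (((i * nc + j + 1 : Nat) : Int) ∈ rest ∧ i < nr ∧ j < nc) := by
          rintro ⟨ha, _⟩; exact hmem ha
        rw [if_neg hm1]
        by_cases hrng : i < nr ∧ j < nc
        · rw [if_pos ⟨hv, hrng.1, hrng.2⟩, if_pos ⟨List.mem_cons.mpr (Or.inl hv.symm), hrng.1, hrng.2⟩]
        · have hm2 : ¬ (v = ((i * nc + j + 1 : Nat) : Int) ∧ i < nr ∧ j < nc) := by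
            rintro ⟨_, h2, h3⟩; exact hrng ⟨h2, h3⟩
          have hm3 : ¬ (((i * nc + j + 1 : Nat) : Int) ∈ v :: rest ∧ i < nr ∧ j < nc) := by
            rintro ⟨_, h2, h3⟩; exact hrng ⟨h2, h3⟩
          rw [if_neg hm2, if_neg hm3]
      · have hm1 : ¬ (((i * nc + j + 1 : Nat) : Int) ∈ rest ∧ i < nr ∧ j < nc) := by
          rintro ⟨ha, _⟩; exact hmem ha
        rw [if_neg hm1]
        have hm2 : ¬ (v = ((i * nc + j + 1 : Nat) : Int) ∧ i < nr ∧ j < nc) := by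
          rintro ⟨h1, _⟩; exact hv h1
        rw [if_neg hm2]
        have hm3 : ¬ (((i * nc + j + 1 : Nat) : Int) ∈ v :: rest ∧ i < nr ∧ j < nc) := by
          rintro ⟨ha, h2, h3⟩
          rcases List.mem_cons.mp ha with h | h
          · exact hv h.symm
          · exact hmem h
        rw [if_neg hm3]

lemma pvFold_length (nr nc : Nat) (model : List Int) (m : List (List (Option String))) :
    (model.foldl (pvStep nr nc) m).length = m.length := by
  induction model generalizing m with
  | nil => rfl
  | cons v rest ih => simp [List.foldl_cons, ih, pvStep_length]

lemma pvFold_row_length (nr nc : Nat) (model : List Int) (m : List (List (Option String)))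
    (i : Nat) :
    ((model.foldl (pvStep nr nc) m)[i]?.map List.length) = (m[i]?.map List.length) := by
  induction model generalizing m with
  | nil => rfl
  | cons v rest ih => simp [List.foldl_cons, ih, pvStep_row_length]

-- ===== VERDICT (by name: the statement is the Claim_ definition above) =====
theorem edit_matrix_spec : Claim_equal_edit_matrix := by
  intro matrix model _ hpre
  obtain ⟨hne, hrows⟩ := hpre
  have key : ∀ (nr nc : Nat) (m1 : List (List (Option String))),
      nr = matrix.length → nc = (matrix.headD []).length →
      m1 = (if nc ≠ 0 then model.foldl (pvStep nr nc) matrix else matrix) →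
      (matrix.mapIdx (fun i row =>
        row.mapIdx (fun j c =>
          if j < nc then
            match c with
            | none => if (((i * nc + j + 1 : Nat) : Int) ∈ model) then some "T" else some "G"
            | some s => some s
          else c)))
        = m1.map (fun row => row.mapIdx (fun j c => if j < nc ∧ c = none then some "G" else c)) := by
    intro nr nc m1 hnr hnc hm1
    have hm1len : m1.length = matrix.length := by
      rw [hm1]
      split_ifs
      · exact pvFold_length nr nc model matrix
      · rfl
    have hm1row : ∀ i : Nat, (m1[i]?.map List.length) = (matrix[i]?.map List.length) := by
      intro i
      rw [hm1]
      split_ifs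
      · exact pvFold_row_length nr nc model matrix i
      · rfl
    have hm1cell : ∀ i j : Nat, pvCell m1 i j =
        if ((i * nc + j + 1 : Nat) : Int) ∈ model ∧ i < nr ∧ j < nc then
          (pvCell matrix i j).map pvMark
        else pvCell matrix i j := by
      intro i j
      rw [hm1]
      by_cases h : nc ≠ 0
      · rw [if_pos h]
        exact pvFold_cell nr nc h model matrix i j
      · rw [if_neg h]
        have h0 : nc = 0 := by omega
        have hno : ¬ (((i * nc + j + 1 : Nat) : Int) ∈ model ∧ i < nr ∧ j < nc) := by
          rintro ⟨_, _, hj⟩; omega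
        rw [if_neg hno]
    apply List.ext_getElem?
    intro i
    rw [List.getElem?_mapIdx, List.getElem?_map]
    rcases hrow : matrix[i]? with _ | row
    · have : m1[i]? = none := by
        rw [List.getElem?_eq_none_iff] at hrow ⊢; omega
      simp [this]
    · have h1 : ∃ row', m1[i]? = some row' ∧ row'.length = row.length := by
        have hrl := hm1row i
        rw [hrow] at hrl
        rcases h : m1[i]? with _ | row'
        · rw [h] at hrl; simp at hrl
        · rw [h] at hrl; simp at hrl; exact ⟨row', rfl, hrl⟩
      obtain ⟨row', hrow', hlen⟩ := h1
      rw [hrow', Option.map_some, Option.map_some]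
      congr 1
      apply List.ext_getElem?
      intro j
      rw [List.getElem?_mapIdx, List.getElem?_mapIdx]
      have hcell := hm1cell i j
      unfold pvCell at hcell
      rw [hrow, hrow'] at hcell
      simp only [Option.bind_eq_bind, Option.bind_some] at hcell
      rcases hc : row[j]? with _ | c
      · have hj' : row'[j]? = none := by
          rw [List.getElem?_eq_none_iff] at hc ⊢; omega
        simp [hj']
      · obtain ⟨hi0, -⟩ := List.getElem?_eq_some_iff.mp hrow
        have hi : i < nr := by rw [hnr]; exact hi0
        rw [hc] at hcell
        by_cases hj : j < nc
        · by_cases hmem : ((i * nc + j + 1 : Nat) : Int) ∈ model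
          · rw [if_pos ⟨hmem, hi, hj⟩] at hcell
            rw [hcell]
            have hmem' := hmem
            push_cast at hmem'
            rcases c with _ | s <;> simp [pvMark, hj, hmem']
          · have hno : ¬ (((i * nc + j + 1 : Nat) : Int) ∈ model ∧ i < nr ∧ j < nc) := by
              tauto
            rw [if_neg hno] at hcell
            rw [hcell]
            have hmem' := hmem
            push_cast at hmem'
            rcases c with _ | s <;> simp [hj, hmem']
        · have hno : ¬ (((i * nc + j + 1 : Nat) : Int) ∈ model ∧ i < nr ∧ j < nc) := by
            tauto
          rw [if_neg hno] at hcell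
          rw [hcell]
          simp [hj]
  exact key _ _ _ rfl rfl rfl
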